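-- pv_equiv track=rewrite | github.com/the-omega-institute/automath | theory/2026_golden_ratio_driven_scan_projection_generation_recursive_emergence/scripts/equational_theory/compare_prime_saturation_to_364.py | anti_pairs_from_patterns
-- ===== SOURCE A (Python) =====
-- def anti_pairs_from_patterns(patterns: set[int], equation_count: int) -> int:
--     all_equations = (1 << equation_count) - 1
--     anti = 0
--     for satisfied in patterns:
--         refuted = all_equations ^ satisfied
--         bits = satisfied
--         while bits:
--             low_bit = bits & -bits
--             index = low_bit.bit_length() - 1
--             bits -= low_bit
--             anti |= refuted << (index * equation_count)
--     return anti
-- ===== SOURCE B (Python) =====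
-- def anti_pairs_from_patterns(patterns: set[int], equation_count: int) -> int:
--     # Accumulate the per-block OR in small ints, assemble the big integer once.
--     all_equations = (1 << equation_count) - 1
--     blocks = []
--     for satisfied in patterns:
--         refuted = all_equations ^ satisfied
--         s = satisfied
--         j = 0
--         while s:
--             if s & 1:
--                 if j >= len(blocks):
--                     blocks.extend([0] * (j + 1 - len(blocks)))
--                 blocks[j] |= refuted
--             s >>= 1
--             j += 1
--     anti = 0
--     for j, v in enumerate(blocks):
--         anti |= v << (j * equation_count)
--     return anti
-- ===== Notes on version B (the rewrite author's own statement) =====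
-- stated objective: alternative
-- what changed: Instead of OR-ing each shifted complement directly into the ever-growing big result integer, B accumulates the per-bit-position OR of complements in a list of small ints and assembles the blocked big integer once at the end.
import Mathlib
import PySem

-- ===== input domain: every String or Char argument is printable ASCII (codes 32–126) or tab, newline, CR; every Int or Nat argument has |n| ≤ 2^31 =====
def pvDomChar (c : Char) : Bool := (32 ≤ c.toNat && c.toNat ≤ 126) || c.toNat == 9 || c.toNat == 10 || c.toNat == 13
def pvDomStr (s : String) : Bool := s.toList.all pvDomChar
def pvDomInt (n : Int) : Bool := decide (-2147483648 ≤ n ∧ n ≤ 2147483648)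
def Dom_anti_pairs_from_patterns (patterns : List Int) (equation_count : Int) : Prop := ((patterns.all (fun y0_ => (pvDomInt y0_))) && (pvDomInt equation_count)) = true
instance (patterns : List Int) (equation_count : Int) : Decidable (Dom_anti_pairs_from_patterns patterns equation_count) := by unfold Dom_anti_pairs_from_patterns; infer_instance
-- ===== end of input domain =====

-- B accumulates the per-bit-position OR of complements in a list of small ints and
-- assembles the blocked big integer once at the end, instead of OR-ing each shifted
-- complement into the ever-growing result integer as A does.

-- ===== PORT A =====
-- inner 'while bits:' loop of A (fuel only totalizes it; on negative bits, which Pre_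
-- excludes, the Python loop diverges). '.toNat' on the shift count is exact on Pre_,
-- where index ≥ 0 and equation_count ≥ 0 (Python raises on a negative shift count).
def pvAInner (equation_count refuted : Int) : Nat → Int → Int → Int
  | 0, _, anti => anti
  | fuel + 1, bits, anti =>
    if bits ≠ 0 then
      let low_bit := PySem.Int.band bits (-bits)
      let index : Int := (PySem.Int.bitLength low_bit : Int) - 1
      pvAInner equation_count refuted fuel (bits - low_bit)
        (PySem.Int.bor anti (refuted <<< (index * equation_count).toNat))
    else anti

def anti_pairs_from_patterns (patterns : List Int) (equation_count : Int) : Int :=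
  -- '1 << equation_count' : exact for equation_count ≥ 0 (Pre_; Python raises otherwise)
  let all_equations : Int := (1 <<< equation_count.toNat) - 1
  patterns.foldl (fun anti satisfied =>
    pvAInner equation_count (PySem.Int.bxor all_equations satisfied)
      (satisfied.natAbs + 1) satisfied anti) 0

-- ===== PORT B =====
-- inner 'while s:' loop of B (fuel only totalizes it). 'j.toNat' is exact: j starts at 0
-- and only increases, and the shift counts are nonnegative on Pre_.
def pvPad (blocks : List Int) (j : Int) : List Int :=
  if (blocks.length : Int) ≤ j then blocks ++ List.replicate (j + 1 - blocks.length).toNat 0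
  else blocks

def pvSetBlock (blocks : List Int) (j refuted : Int) : List Int :=
  (pvPad blocks j).set j.toNat (PySem.Int.bor ((pvPad blocks j).getD j.toNat 0) refuted)

def pvBInner (refuted : Int) : Nat → Int → Int → List Int → List Int
  | 0, _, _, blocks => blocks
  | fuel + 1, s, j, blocks =>
    if s ≠ 0 then
      pvBInner refuted fuel (s >>> (1 : Nat)) (j + 1)
        (if PySem.Int.band s 1 ≠ 0 then pvSetBlock blocks j refuted else blocks)
    else blocks

def anti_pairs_from_patterns_alt (patterns : List Int) (equation_count : Int) : Int :=
  let all_equations : Int := (1 <<< equation_count.toNat) - 1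
  let blocks := patterns.foldl (fun blocks satisfied =>
    pvBInner (PySem.Int.bxor all_equations satisfied)
      (satisfied.natAbs + 1) satisfied 0 blocks) []
  blocks.zipIdx.foldl (fun (anti : Int) (vj : Int × Nat) => PySem.Int.bor anti (vj.1 <<< (vj.2 * equation_count.toNat))) 0

-- ===== PRECONDITION & SPEC =====
-- Pre_ excludes equation_count < 0 (Python A raises ValueError on '1 << equation_count')
-- and negative patterns (A's 'while bits' loop never terminates there).
def Pre_anti_pairs_from_patterns (patterns : List Int) (equation_count : Int) : Prop :=
  0 ≤ equation_count ∧ ∀ s ∈ patterns, 0 ≤ s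
instance (patterns : List Int) (equation_count : Int) : Decidable (Pre_anti_pairs_from_patterns patterns equation_count) := by
  unfold Pre_anti_pairs_from_patterns; infer_instance

def pvWitness_anti_pairs_from_patterns : List Int × Int := ([5, 3], 3)

def Spec_anti_pairs_from_patterns (patterns : List Int) (equation_count : Int) (out : Int) : Prop :=
  out = anti_pairs_from_patterns_alt patterns equation_count
instance (patterns : List Int) (equation_count : Int) (out : Int) : Decidable (Spec_anti_pairs_from_patterns patterns equation_count out) := by
  unfold Spec_anti_pairs_from_patterns; infer_instance

-- ===== CLAIM (what is proved, stated in full; the proofs are below) =====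
def Claim_equal_anti_pairs_from_patterns : Prop :=
  ∀ (patterns : List Int) (equation_count : Int),
    Dom_anti_pairs_from_patterns patterns equation_count →
    Pre_anti_pairs_from_patterns patterns equation_count →
    Spec_anti_pairs_from_patterns patterns equation_count (anti_pairs_from_patterns patterns equation_count)

-- ===== LEMMAS AND PROOFS =====

-- Nat model: contribution of one pattern m (refuted value r), reading bits low-to-high
def natContrib (ec r : Nat) (m j : Nat) : Nat :=
  if m = 0 then 0
  else (if m % 2 = 1 then r <<< (j * ec) else 0) ||| natContrib ec r (m / 2) (j + 1)
decreasing_by exact Nat.div_lt_self (Nat.pos_of_ne_zero (by assumption)) one_lt_two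

-- Nat model of B's block update at position j
def setOr (bl : List Nat) (j r : Nat) : List Nat :=
  let padded := if bl.length ≤ j then bl ++ List.replicate (j + 1 - bl.length) 0 else bl
  padded.set j (padded.getD j 0 ||| r)

def natUpd (r : Nat) (m j : Nat) (bl : List Nat) : List Nat :=
  if m = 0 then bl
  else natUpd r (m / 2) (j + 1) (if m % 2 = 1 then setOr bl j r else bl)
decreasing_by exact Nat.div_lt_self (Nat.pos_of_ne_zero (by assumption)) one_lt_two

-- Nat model of B's final assembly, block index starting at k
def gval (ec : Nat) : Nat → List Nat → Nat
  | _, [] => 0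
  | k, v :: t => v <<< (k * ec) ||| gval ec (k + 1) t

theorem lorZero (a : Nat) : a ||| 0 = a := by simp

theorem zeroLor (a : Nat) : 0 ||| a = a := by simp

theorem shiftLeft_lor (a b n : Nat) : (a ||| b) <<< n = a <<< n ||| b <<< n := by
  apply Nat.eq_of_testBit_eq; intro i
  simp [Nat.testBit_shiftLeft, Nat.testBit_or, Bool.and_or_distrib_left]

theorem land_succ_self (t : Nat) : (2 * t + 1) &&& (2 * t) = 2 * t := by
  apply Nat.eq_of_testBit_eq; intro i
  cases i with
  | zero => simp [Nat.testBit_and, Nat.testBit_zero, Nat.mul_mod_right, Nat.add_mul_mod_self_left]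
  | succ i =>
      rw [Nat.testBit_and]
      have h1 : (2 * t + 1) / 2 = t := by omega
      have h2 : (2 * t) / 2 = t := by omega
      simp [Nat.testBit_succ, h1, h2]

-- lowest set bit of 2^j * m (m odd): m &&& (m - 1) clears it
theorem land_pred (j : Nat) : ∀ m : Nat, m % 2 = 1 →
    (2 ^ j * m) &&& (2 ^ j * m - 1) = 2 ^ j * m - 2 ^ j := by
  induction j with
  | zero =>
      intro m hm
      obtain ⟨t, rfl⟩ : ∃ t, m = 2 * t + 1 := ⟨m / 2, by omega⟩
      have h1 : 2 * t + 1 - 1 = 2 * t := by omega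
      simpa [h1] using land_succ_self t
  | succ j IH =>
      intro m hm
      have hmpos : 0 < m := by omega
      set a := 2 ^ j * m with ha
      have hapos : 0 < a := by positivity
      have h2a : 2 ^ (j + 1) * m = 2 * a := by rw [pow_succ]; ring
      have hpred : 2 * a - 1 = 2 * (a - 1) + 1 := by omega
      have key : (2 * a) &&& (2 * a - 1) = 2 * (a &&& (a - 1)) := by
        apply Nat.eq_of_testBit_eq; intro i
        cases i with
        | zero => simp [Nat.testBit_and, Nat.testBit_zero, Nat.mul_mod_right]
        | succ i =>
            rw [Nat.testBit_and]
            have h1 : (2 * a) / 2 = a := by omega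
            have h2 : (2 * a - 1) / 2 = a - 1 := by omega
            have h3 : (2 * (a &&& (a - 1))) / 2 = a &&& (a - 1) := by omega
            simp [Nat.testBit_succ, Nat.testBit_and, h1, h2, h3]
      rw [h2a, key, IH m hm]
      have hle : 2 ^ j ≤ a := by
        rw [ha]; calc 2 ^ j = 2 ^ j * 1 := by ring
          _ ≤ 2 ^ j * m := Nat.mul_le_mul_left _ hmpos
      rw [pow_succ]; omega

-- Python's 'bits & -bits' for a positive Int
theorem band_neg (n : Nat) (h : 0 < n) :
    PySem.Int.band (n : Int) (-(n : Int)) = ((n - (n &&& (n - 1)) : Nat) : Int) := by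
  unfold PySem.Int.band
  have h1 : (0:Int) ≤ (n:Int) := by positivity
  have h2 : ¬ (0:Int) ≤ -(n:Int) := by omega
  simp only [h1, h2, if_true, if_false]
  have h3 : (-(-(n:Int)) - 1).toNat = n - 1 := by omega
  have h4 : ((n:Int)).toNat = n := by omega
  rw [h3, h4]

theorem bitLength_two_pow (j : Nat) : PySem.Int.bitLength ((2 ^ j : Nat) : Int) = j + 1 := by
  induction j with
  | zero => decide
  | succ j IH =>
      rw [PySem.Int.bitLength_natCast (by positivity)]
      have : 2 ^ (j + 1) / 2 = 2 ^ j := by rw [pow_succ]; omega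
      rw [this, IH]

-- A's inner loop computes natContrib (bits = 2^j * m, j the number of bits already consumed)
theorem AInner_eq (ec r : Nat) : ∀ m : Nat, ∀ j fuel (anti : Nat), 2 ^ j * m ≤ fuel →
    pvAInner (ec : Int) (r : Int) fuel ((2 ^ j * m : Nat) : Int) (anti : Int)
      = ((anti ||| natContrib ec r m j : Nat) : Int) := by
  intro m
  induction m using Nat.strong_induction_on with
  | _ m IH =>
    intro j fuel anti hfuel
    rcases Nat.eq_zero_or_pos m with hm0 | hmpos
    · subst hm0
      have hc : natContrib ec r 0 j = 0 := by rw [natContrib]; simp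
      rw [hc, lorZero, Nat.mul_zero]
      cases fuel with
      | zero => rfl
      | succ f => simp [pvAInner]
    · rcases Nat.even_or_odd m with hme | hmo
      · -- even: same integer, shift the exponent
        have hm2 : m % 2 = 0 := Nat.even_iff.mp hme
        obtain ⟨t, rfl⟩ : ∃ t, m = 2 * t := ⟨m / 2, by omega⟩
        have heq : 2 ^ j * (2 * t) = 2 ^ (j + 1) * t := by ring
        have ht2 : 2 * t / 2 = t := by omega
        rw [heq, IH t (by omega) (j + 1) fuel anti (heq ▸ hfuel)]
        conv_rhs => rw [natContrib]
        rw [if_neg (by omega : ¬ 2 * t = 0), if_neg (by omega : ¬ 2 * t % 2 = 1), zeroLor, ht2]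
      · have hm2 : m % 2 = 1 := Nat.odd_iff.mp hmo
        obtain ⟨t, rfl⟩ : ∃ t, m = 2 * t + 1 := ⟨m / 2, by omega⟩
        have hsplit : 2 ^ j * (2 * t + 1) = 2 ^ (j + 1) * t + 2 ^ j := by ring
        have hone : 1 ≤ 2 ^ j := Nat.one_le_two_pow
        have hnpos : 0 < 2 ^ j * (2 * t + 1) := by positivity
        obtain ⟨f, rfl⟩ : ∃ f, fuel = f + 1 := ⟨fuel - 1, by omega⟩
        rw [pvAInner]
        have hne : ((2 ^ j * (2 * t + 1) : Nat) : Int) ≠ 0 := by exact_mod_cast hnpos.ne'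
        have hland : (2 ^ j * (2 * t + 1)) &&& (2 ^ j * (2 * t + 1) - 1)
            = 2 ^ j * (2 * t + 1) - 2 ^ j := land_pred j (2 * t + 1) (by omega)
        have hlow : PySem.Int.band ((2 ^ j * (2 * t + 1) : Nat) : Int) (-((2 ^ j * (2 * t + 1) : Nat) : Int))
            = ((2 ^ j : Nat) : Int) := by
          rw [band_neg _ hnpos, hland]
          congr 1; omega
        have hidx : ((j + 1 : Nat) : Int) - 1 = (j : Int) := by push_cast; ring
        have hcount : ((j : Int) * (ec : Int)).toNat = j * ec := by
          rw [← Nat.cast_mul, Int.toNat_natCast]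
        have hshift : ((r : Int) <<< (j * ec)) = ((r <<< (j * ec) : Nat) : Int) := by
          exact_mod_cast rfl
        have hbits' : ((2 ^ j * (2 * t + 1) : Nat) : Int) - ((2 ^ j : Nat) : Int)
            = ((2 ^ (j + 1) * t : Nat) : Int) := by
          rw [← Nat.cast_sub (by omega : 2 ^ j ≤ 2 ^ j * (2 * t + 1))]
          congr 1; omega
        rw [if_pos hne]
        simp only [hlow, bitLength_two_pow, hidx, hcount, hshift, PySem.Int.bor_natCast, hbits']
        have hfuel' : 2 ^ (j + 1) * t ≤ f := by omega
        rw [IH t (by omega) (j + 1) f _ hfuel']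
        conv_rhs => rw [natContrib]
        rw [if_neg (by omega : ¬ 2 * t + 1 = 0), if_pos (by omega : (2 * t + 1) % 2 = 1),
          (by omega : (2 * t + 1) / 2 = t), Nat.lor_assoc]

-- gval after one block update
theorem set_replicate (j r : Nat) :
    (List.replicate (j + 1) (0 : Nat)).set j r = List.replicate j 0 ++ [r] := by
  induction j with
  | zero => rfl
  | succ j IH =>
      rw [List.replicate_succ, List.set_cons_succ, IH]
      rfl

theorem setOr_nil (j r : Nat) : setOr [] j r = List.replicate j 0 ++ [r] := by
  unfold setOr
  simp only [List.length_nil, Nat.zero_le, if_pos, List.nil_append, Nat.sub_zero]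
  have hget : (List.replicate (j + 1) (0 : Nat)).getD j 0 = 0 := by
    simp [List.getD, List.getElem?_replicate]
  rw [hget, zeroLor, set_replicate]

theorem gval_zeros (ec r : Nat) : ∀ (j k : Nat),
    gval ec k (List.replicate j 0 ++ [r]) = r <<< ((k + j) * ec) := by
  intro j
  induction j with
  | zero => intro k; simp [gval]
  | succ j IH =>
      intro k
      rw [List.replicate_succ, List.cons_append]
      show (0 : Nat) <<< (k * ec) ||| gval ec (k + 1) (List.replicate j 0 ++ [r]) = _
      rw [IH (k + 1), Nat.zero_shiftLeft, zeroLor,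
        show k + 1 + j = k + (j + 1) from by omega]

theorem gval_setOr (ec r : Nat) : ∀ (bl : List Nat) (j k : Nat),
    gval ec k (setOr bl j r) = gval ec k bl ||| r <<< ((k + j) * ec) := by
  intro bl
  induction bl with
  | nil =>
      intro j k
      rw [setOr_nil, gval_zeros]
      show _ = (0 : Nat) ||| _
      rw [zeroLor]
  | cons v t IHt =>
      intro j k
      cases j with
      | zero =>
          have h1 : setOr (v :: t) 0 r = (v ||| r) :: t := by
            simp [setOr, List.getD]
          rw [h1]
          show (v ||| r) <<< (k * ec) ||| gval ec (k + 1) t = _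
          rw [shiftLeft_lor]
          show v <<< (k * ec) ||| r <<< (k * ec) ||| gval ec (k + 1) t = _
          rw [Nat.lor_assoc, Nat.lor_comm (r <<< (k * ec)) _, ← Nat.lor_assoc]
          rfl
      | succ j =>
          have h1 : setOr (v :: t) (j + 1) r = v :: setOr t j r := by
            unfold setOr
            by_cases hlen : t.length ≤ j
            · have hlen' : (v :: t).length ≤ j + 1 := by simp; omega
              simp only [if_pos hlen, if_pos hlen']
              have : (v :: t).length = t.length + 1 := rfl
              rw [this]
              have h2 : j + 1 + 1 - (t.length + 1) = j + 1 - t.length := by omega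
              rw [h2]
              rfl
            · have hlen' : ¬ (v :: t).length ≤ j + 1 := by simp; omega
              simp only [if_neg hlen, if_neg hlen']
              rfl
          rw [h1]
          show v <<< (k * ec) ||| gval ec (k + 1) (setOr t j r) = _
          rw [IHt j (k + 1), ← Nat.lor_assoc,
            show k + 1 + j = k + (j + 1) from by omega]
          rfl

-- gval after a whole pattern's worth of updates
theorem gval_natUpd (ec r : Nat) : ∀ m j (bl : List Nat),
    gval ec 0 (natUpd r m j bl) = gval ec 0 bl ||| natContrib ec r m j := by
  intro m
  induction m using Nat.strong_induction_on with
  | _ m IH =>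
    intro j bl
    rcases Nat.eq_zero_or_pos m with hm0 | hmpos
    · subst hm0; rw [natUpd, if_pos rfl, natContrib, if_pos rfl, lorZero]
    · rw [natUpd, if_neg (by omega : ¬ m = 0)]
      rw [IH (m / 2) (Nat.div_lt_self hmpos one_lt_two)]
      conv_rhs => rw [natContrib]
      rw [if_neg (by omega : ¬ m = 0)]
      by_cases hpar : m % 2 = 1
      · simp only [if_pos hpar]
        rw [gval_setOr, Nat.zero_add, Nat.lor_assoc]
      · simp only [if_neg hpar]
        rw [zeroLor]

-- the cast of B's block update is setOr
theorem cast_setOr (bl : List Nat) (j r : Nat) :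
    pvSetBlock (bl.map (Nat.cast : Nat → Int)) ((j : Nat) : Int) ((r : Nat) : Int)
      = (setOr bl j r).map (Nat.cast : Nat → Int) := by
  unfold pvSetBlock pvPad setOr
  simp only [List.length_map, Int.toNat_natCast]
  by_cases hlen : bl.length ≤ j
  · rw [if_pos (by exact_mod_cast hlen : ((bl.length : Nat) : Int) ≤ ((j : Nat) : Int)),
      if_pos hlen]
    have htn : (((j : Nat) : Int) + 1 - ((bl.length : Nat) : Int)).toNat = j + 1 - bl.length := by
      omega
    rw [htn]
    have hrep : List.replicate (j + 1 - bl.length) (0 : Int)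
        = (List.replicate (j + 1 - bl.length) (0 : Nat)).map (Nat.cast : Nat → Int) := by
      simp
    rw [hrep, ← List.map_append]
    have hgd : ((bl ++ List.replicate (j + 1 - bl.length) 0).map (Nat.cast : Nat → Int)).getD j 0
        = (((bl ++ List.replicate (j + 1 - bl.length) 0).getD j 0 : Nat) : Int) := by
      simpa only [Nat.cast_zero] using List.getD_map (bl ++ List.replicate (j + 1 - bl.length) 0) 0
        (Nat.cast : Nat → Int) (n := j)
    rw [hgd, PySem.Int.bor_natCast, ← List.map_set]
  · rw [if_neg (by exact_mod_cast hlen : ¬ ((bl.length : Nat) : Int) ≤ ((j : Nat) : Int)),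
      if_neg hlen]
    have hgd : (bl.map (Nat.cast : Nat → Int)).getD j 0 = ((bl.getD j 0 : Nat) : Int) := by
      simpa only [Nat.cast_zero] using List.getD_map bl 0 (Nat.cast : Nat → Int) (n := j)
    rw [hgd, PySem.Int.bor_natCast, ← List.map_set]

-- B's inner loop is natUpd (everything nonnegative)
theorem BInner_eq (r : Nat) : ∀ m : Nat, ∀ fuel j (bl : List Nat), m ≤ fuel →
    pvBInner (r : Int) fuel ((m : Nat) : Int) ((j : Nat) : Int) (bl.map (Nat.cast : Nat → Int))
      = (natUpd r m j bl).map (Nat.cast : Nat → Int) := by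
  intro m
  induction m using Nat.strong_induction_on with
  | _ m IH =>
    intro fuel j bl hfuel
    rcases Nat.eq_zero_or_pos m with hm0 | hmpos
    · subst hm0
      rw [natUpd, if_pos rfl]
      cases fuel with
      | zero => rfl
      | succ f => simp [pvBInner]
    · obtain ⟨f, rfl⟩ : ∃ f, fuel = f + 1 := ⟨fuel - 1, by omega⟩
      rw [pvBInner]
      have hne : ((m : Nat) : Int) ≠ 0 := by exact_mod_cast hmpos.ne'
      rw [if_pos hne]
      have hshift : ((m : Nat) : Int) >>> (1 : Nat) = ((m / 2 : Nat) : Int) := by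
        exact_mod_cast rfl
      have hband : PySem.Int.band ((m : Nat) : Int) 1 = ((m &&& 1 : Nat) : Int) := by
        exact_mod_cast PySem.Int.band_natCast m 1
      have hj1 : ((j : Nat) : Int) + 1 = ((j + 1 : Nat) : Int) := by push_cast; ring
      rw [natUpd, if_neg (show ¬ m = 0 by omega)]
      by_cases hpar : m % 2 = 1
      · have hband' : PySem.Int.band ((m : Nat) : Int) 1 ≠ 0 := by
          rw [hband, Nat.and_one_is_mod, hpar]; norm_num
        rw [if_pos hband', if_pos hpar, cast_setOr, hshift, hj1]
        exact IH (m / 2) (Nat.div_lt_self hmpos one_lt_two) f (j + 1) (setOr bl j r) (by omega)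
      · have hband' : ¬ PySem.Int.band ((m : Nat) : Int) 1 ≠ 0 := by
          rw [hband, Nat.and_one_is_mod]
          have h0 : m % 2 = 0 := by omega
          rw [h0]; norm_num
        rw [if_neg hband', if_neg hpar, hshift, hj1]
        exact IH (m / 2) (Nat.div_lt_self hmpos one_lt_two) f (j + 1) bl (by omega)

-- B's final assembly fold is gval
theorem final_fold_eq (ec : Nat) : ∀ (bl : List Nat) (k a : Nat),
    ((bl.map (Nat.cast : Nat → Int)).zipIdx k).foldl
        (fun (anti : Int) (vj : Int × Nat) => PySem.Int.bor anti (vj.1 <<< (vj.2 * ec))) ((a : Nat) : Int)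
      = ((a ||| gval ec k bl : Nat) : Int) := by
  intro bl
  induction bl with
  | nil => intro k a; simp [gval]
  | cons v t IH =>
      intro k a
      rw [List.map_cons, List.zipIdx_cons, List.foldl_cons]
      have hshift : ((v : Nat) : Int) <<< (k * ec) = ((v <<< (k * ec) : Nat) : Int) := by
        exact_mod_cast rfl
      rw [hshift, PySem.Int.bor_natCast, IH (k + 1)]
      show _ = ((a ||| (v <<< (k * ec) ||| gval ec (k + 1) t) : Nat) : Int)
      rw [← Nat.lor_assoc]

-- ===== VERDICT (by name: the statement is the Claim_ definition above) =====
theorem anti_pairs_from_patterns_spec : Claim_equal_anti_pairs_from_patterns := by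
  intro patterns equation_count _hdom hpre
  obtain ⟨hec, hpat⟩ := hpre
  unfold Spec_anti_pairs_from_patterns anti_pairs_from_patterns anti_pairs_from_patterns_alt
  obtain ⟨ec, rfl⟩ : ∃ e : Nat, equation_count = (e : Int) := ⟨equation_count.toNat, by omega⟩
  simp only [Int.toNat_natCast]
  have hall : ((1 <<< ec : Nat) : Int) - 1 = ((2 ^ ec - 1 : Nat) : Int) := by
    rw [Nat.shiftLeft_eq, one_mul]
    have h1 : (1 : Nat) ≤ 2 ^ ec := Nat.one_le_two_pow
    push_cast [h1]
    ring
  rw [hall]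
  -- both folds, with generalized accumulators coupled by 'anti = gval ec 0 bl'
  suffices h : ∀ (ps : List Int), (∀ s ∈ ps, 0 ≤ s) → ∀ (a : Nat) (bl : List Nat),
      ps.foldl (fun anti satisfied =>
        pvAInner (ec : Int) (PySem.Int.bxor ((2 ^ ec - 1 : Nat) : Int) satisfied)
          (satisfied.natAbs + 1) satisfied anti) ((a ||| gval ec 0 bl : Nat) : Int)
      = (((ps.foldl (fun blocks satisfied =>
          pvBInner (PySem.Int.bxor ((2 ^ ec - 1 : Nat) : Int) satisfied)
            (satisfied.natAbs + 1) satisfied 0 blocks) (bl.map (Nat.cast : Nat → Int))).zipIdx).foldl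
          (fun (anti : Int) (vj : Int × Nat) => PySem.Int.bor anti (vj.1 <<< (vj.2 * ec))) ((a : Nat) : Int)) by
    have := h patterns hpat 0 []
    simpa using this
  intro ps
  induction ps with
  | nil =>
      intro _ a bl
      simp only [List.foldl_nil]
      rw [final_fold_eq]
  | cons s t IHt =>
      intro hmem a bl
      have hs : 0 ≤ s := hmem s (List.mem_cons_self)
      obtain ⟨m, rfl⟩ : ∃ m : Nat, s = (m : Int) := ⟨s.toNat, by omega⟩
      simp only [List.foldl_cons]
      have hnatAbs : ((m : Int)).natAbs = m := Int.natAbs_natCast m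
      rw [hnatAbs, PySem.Int.bxor_natCast]
      set r := (2 ^ ec - 1) ^^^ m with hr
      -- A side: one pattern consumed
      have hA : pvAInner (ec : Int) ((r : Nat) : Int) (m + 1) ((m : Nat) : Int)
            ((a ||| gval ec 0 bl : Nat) : Int)
          = (((a ||| gval ec 0 bl) ||| natContrib ec r m 0 : Nat) : Int) := by
        have := AInner_eq ec r m 0 (m + 1) (a ||| gval ec 0 bl) (by simp)
        simpa using this
      have hB : pvBInner ((r : Nat) : Int) (m + 1) ((m : Nat) : Int) ((0 : Nat) : Int)
            (bl.map (Nat.cast : Nat → Int))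
          = (natUpd r m 0 bl).map (Nat.cast : Nat → Int) := by
        exact BInner_eq r m (m + 1) 0 bl (by omega)
      rw [hA]
      rw [show ((0 : Nat) : Int) = (0 : Int) from rfl] at hB
      rw [hB]
      have hcouple : (a ||| gval ec 0 bl) ||| natContrib ec r m 0
          = a ||| gval ec 0 (natUpd r m 0 bl) := by
        rw [gval_natUpd, Nat.lor_assoc]
      rw [hcouple]
      exact IHt (fun x hx => hmem x (List.mem_cons_of_mem _ hx)) a (natUpd r m 0 bl)
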